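-- pv_equiv track=rewrite | github.com/biankabakullari/UncertainLogProbabilities | code/Trace_Realizations_Alg/combine_WO_swapping.py | combine_WO_swapping
-- ===== SOURCE A (Python) =====
-- import itertools as it
--
-- def combine_WO_swapping(Pi_lists):
--     k = len(Pi_lists)
--     if k == 1:
--         # Input is [P], return P
--         return Pi_lists[0]
--
--         # input is [P1,...,Pk] with k > 1
--     full_sequences = []
--
--     # on position j, element [0,...,len(P_j)]
--     Pi_indices = []
--     for i in range(k):
--         indices = [x for x in range(len(Pi_lists[i]))]
--         Pi_indices.append(indices)
--
--     cartesian_prod_indices = []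
--     # each element shows in pos j with sequence to take from P_j
--     for element in it.product(*Pi_indices):
--         cartesian_prod_indices.append(element)
--         sequence = []
--         for i, x in enumerate(element):
--             sequence += Pi_lists[i][x]
--         full_sequences.append(sequence)
--
--     return full_sequences
-- ===== SOURCE B (Python) =====
-- def combine_WO_swapping(Pi_lists):
--     k = len(Pi_lists)
--     if k == 1:
--         return Pi_lists[0]
--     # progressive prefix-building sweep: fold across the lists,
--     # extending every partial row by every choice from the current list
--     results = [[]]
--     for P in Pi_lists:
--         new_results = []
--         for r in results:
--             for chosen in P:
--                 s = list(r)
--                 s += chosen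
--                 new_results.append(s)
--         results = new_results
--     return results
-- ===== Notes on version B (the rewrite author's own statement) =====
-- stated objective: alternative
-- what changed: Replaces the index-tuple Cartesian product (build index ranges, itertools.product, then concatenate by indexing back) with a single progressive fold that extends every partial row by each choice of the current list, producing the same rows in the same order.
import Mathlib
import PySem

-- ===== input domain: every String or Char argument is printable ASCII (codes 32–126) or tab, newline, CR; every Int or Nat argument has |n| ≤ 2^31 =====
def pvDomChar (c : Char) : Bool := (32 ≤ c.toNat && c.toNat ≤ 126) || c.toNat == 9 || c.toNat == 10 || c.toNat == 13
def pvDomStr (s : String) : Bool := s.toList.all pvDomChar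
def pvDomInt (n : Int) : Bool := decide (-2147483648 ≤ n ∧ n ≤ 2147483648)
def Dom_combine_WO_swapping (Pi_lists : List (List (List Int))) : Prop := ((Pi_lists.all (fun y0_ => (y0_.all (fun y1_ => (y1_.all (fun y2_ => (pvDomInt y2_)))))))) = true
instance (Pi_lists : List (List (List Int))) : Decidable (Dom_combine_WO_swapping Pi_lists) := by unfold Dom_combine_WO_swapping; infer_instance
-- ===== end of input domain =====

-- B replaces A's index-tuple Cartesian product with a progressive prefix-building fold
-- over the lists (objective: alternative decomposition, same rows in the same order).

-- ===== PORT A =====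

-- it.product(*lists): first factor varies slowest
def pvProduct : List (List Int) → List (List Int)
  | [] => [[]]
  | xs :: rest => xs.flatMap (fun x => (pvProduct rest).map (fun e => x :: e))

-- 'sequence = []; for i, x in enumerate(element): sequence += Pi_lists[i][x]'
def pvSeqOf (Pi_lists : List (List (List Int))) (element : List Int) : List Int :=
  (PySem.List.enumerate element 0).foldl
    (fun s ix => s ++ PySem.List.pyGetD (PySem.List.pyGetD Pi_lists ix.1 []) ix.2 []) []

def combine_WO_swapping (Pi_lists : List (List (List Int))) : List (List Int) :=
  let k : Int := Pi_lists.length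
  if k = 1 then PySem.List.pyGetD Pi_lists 0 []
  else
    -- 'for i in range(k): Pi_indices.append([x for x in range(len(Pi_lists[i]))])'
    let Pi_indices :=
      (PySem.List.pyRange 0 k 1).map
        (fun i => PySem.List.pyRange 0 ((PySem.List.pyGetD Pi_lists i []).length : Int) 1)
    -- 'for element in it.product(*Pi_indices): … full_sequences.append(sequence)'
    (pvProduct Pi_indices).foldl (fun acc element => acc ++ [pvSeqOf Pi_lists element]) []

-- ===== PORT B =====

-- 'new_results = []; for r in results: for chosen in P: s = list(r); s += chosen; new_results.append(s)'
def pvExtendAll (results : List (List Int)) (P : List (List Int)) : List (List Int) :=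
  results.flatMap (fun r => P.map (fun chosen => r ++ chosen))

def combine_WO_swapping_alt (Pi_lists : List (List (List Int))) : List (List Int) :=
  if (Pi_lists.length : Int) = 1 then PySem.List.pyGetD Pi_lists 0 []
  else Pi_lists.foldl pvExtendAll [[]]

-- ===== PRECONDITION & SPEC =====
def Spec_combine_WO_swapping (Pi_lists : List (List (List Int))) (out : List (List Int)) : Prop := out = combine_WO_swapping_alt Pi_lists
instance (Pi_lists : List (List (List Int))) (out : List (List Int)) : Decidable (Spec_combine_WO_swapping Pi_lists out) := by unfold Spec_combine_WO_swapping; infer_instance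

-- ===== CLAIM (what is proved, stated in full; the proofs are below) =====
def Claim_equal_combine_WO_swapping : Prop := ∀ (Pi_lists : List (List (List Int))), Dom_combine_WO_swapping Pi_lists → Spec_combine_WO_swapping Pi_lists (combine_WO_swapping Pi_lists)

-- ===== LEMMAS AND PROOFS =====

theorem pvExtendAll_nil (P : List (List Int)) : pvExtendAll [] P = [] := rfl

theorem foldl_pvExtendAll_nil (L : List (List (List Int))) :
    L.foldl pvExtendAll [] = [] := by
  induction L with
  | nil => rfl
  | cons P L ih => rw [List.foldl_cons, pvExtendAll_nil, ih]

theorem pvExtendAll_append (a b P) :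
    pvExtendAll (a ++ b) P = pvExtendAll a P ++ pvExtendAll b P := by
  simp [pvExtendAll]

theorem foldl_pvExtendAll_append (L : List (List (List Int))) :
    ∀ a b, L.foldl pvExtendAll (a ++ b) = L.foldl pvExtendAll a ++ L.foldl pvExtendAll b := by
  induction L with
  | nil => intro a b; simp
  | cons P L ih => intro a b; simp [List.foldl_cons, pvExtendAll_append, ih]

theorem foldl_pvExtendAll_map (L : List (List (List Int))) (P : List (List Int))
    (g : List Int → List Int) :
    L.foldl pvExtendAll (P.map g) = P.flatMap (fun c => L.foldl pvExtendAll [g c]) := by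
  induction P with
  | nil => simp [foldl_pvExtendAll_nil]
  | cons c P ih =>
      have h : (c :: P).map g = [g c] ++ P.map g := by simp
      rw [h, foldl_pvExtendAll_append, ih]; simp

theorem flatMap_range_getD {α β : Type} (d : α) (P : List α) (G : α → List β) :
    (List.range P.length).flatMap (fun k => G (P.getD k d)) = P.flatMap G := by
  induction P with
  | nil => simp
  | cons p P ih =>
      rw [List.length_cons, List.range_succ_eq_map]
      simp only [List.flatMap_cons, List.flatMap_map]
      simpa using congrArg (fun t => G p ++ t) ih

theorem pv_main (Pi : List (List (List Int))) :
    ∀ (L : List (List (List Int))) (n : Nat) (pref : List Int), Pi.drop n = L →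
    (pvProduct (L.map (fun P => PySem.List.pyRange 0 (P.length : Int) 1))).map
      (fun e => (PySem.List.enumerate e (n : Int)).foldl
        (fun s ix => s ++ PySem.List.pyGetD (PySem.List.pyGetD Pi ix.1 []) ix.2 []) pref)
    = L.foldl pvExtendAll [pref] := by
  intro L
  induction L with
  | nil =>
      intro n pref _
      simp [pvProduct, PySem.List.enumerate_nil]
  | cons P L ih =>
      intro n pref hdrop
      have h0 : Pi[n]? = some P := by
        have h := congrArg (fun l => l[0]?) hdrop
        simpa using h
      have hget : PySem.List.pyGetD Pi (n : Int) [] = P := by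
        simp [PySem.List.pyGetD_natCast, List.getD, h0]
      have hdrop' : Pi.drop (n + 1) = L := by
        have h := congrArg (List.drop 1) hdrop
        simpa [List.drop_drop, Nat.add_comm] using h
      have hk : ∀ k : Nat,
          (pvProduct (L.map (fun P => PySem.List.pyRange 0 (P.length : Int) 1))).map
            (fun e => (PySem.List.enumerate ((k : Int) :: e) (n : Int)).foldl
              (fun s ix => s ++ PySem.List.pyGetD (PySem.List.pyGetD Pi ix.1 []) ix.2 []) pref)
          = L.foldl pvExtendAll [pref ++ P.getD k []] := by
        intro k
        have he : ∀ e : List Int,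
            (PySem.List.enumerate ((k : Int) :: e) (n : Int)).foldl
              (fun s ix => s ++ PySem.List.pyGetD (PySem.List.pyGetD Pi ix.1 []) ix.2 []) pref
            = (PySem.List.enumerate e ((n + 1 : Nat) : Int)).foldl
              (fun s ix => s ++ PySem.List.pyGetD (PySem.List.pyGetD Pi ix.1 []) ix.2 [])
              (pref ++ P.getD k []) := by
          intro e
          rw [PySem.List.enumerate_cons, List.foldl_cons]
          simp [hget, PySem.List.pyGetD_natCast, Nat.cast_add, Nat.cast_one]
        simp only [he]
        exact ih (n + 1) (pref ++ P.getD k []) hdrop'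
      calc
        (pvProduct ((P :: L).map (fun P => PySem.List.pyRange 0 (P.length : Int) 1))).map
            (fun e => (PySem.List.enumerate e (n : Int)).foldl
              (fun s ix => s ++ PySem.List.pyGetD (PySem.List.pyGetD Pi ix.1 []) ix.2 []) pref)
          = (List.range P.length).flatMap
              (fun (k : Nat) => (pvProduct (L.map (fun P => PySem.List.pyRange 0 (P.length : Int) 1))).map
                (fun e => (PySem.List.enumerate ((k : Int) :: e) (n : Int)).foldl
                  (fun s ix => s ++ PySem.List.pyGetD (PySem.List.pyGetD Pi ix.1 []) ix.2 []) pref)) := by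
            rw [List.map_cons, PySem.List.pyRange_zero_nat]
            simp only [pvProduct, List.map_flatMap, List.map_map, List.flatMap_map,
              Function.comp_def]
        _ = (List.range P.length).flatMap (fun k => L.foldl pvExtendAll [pref ++ P.getD k []]) := by
            simp only [hk]
        _ = P.flatMap (fun c => L.foldl pvExtendAll [pref ++ c]) :=
            flatMap_range_getD [] P (fun c => L.foldl pvExtendAll [pref ++ c])
        _ = (P :: L).foldl pvExtendAll [pref] := by
            rw [List.foldl_cons]
            have h1 : pvExtendAll [pref] P = P.map (fun c => pref ++ c) := by simp [pvExtendAll]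
            rw [h1, foldl_pvExtendAll_map]

-- ===== VERDICT (by name: the statement is the Claim_ definition above) =====
theorem combine_WO_swapping_spec : Claim_equal_combine_WO_swapping := by
  intro Pi _
  unfold Spec_combine_WO_swapping combine_WO_swapping combine_WO_swapping_alt
  by_cases h : (Pi.length : Int) = 1
  · simp [h]
  · simp only [h, if_false]
    rw [PySem.List.foldl_append_singleton_eq_map]
    have hidx : (PySem.List.pyRange 0 (Pi.length : Int) 1).map
        (fun i => PySem.List.pyRange 0 ((PySem.List.pyGetD Pi i []).length : Int) 1)
        = Pi.map (fun P => PySem.List.pyRange 0 (P.length : Int) 1) := by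
      rw [show (fun i => PySem.List.pyRange 0 ((PySem.List.pyGetD Pi i []).length : Int) 1)
            = (fun P : List (List Int) => PySem.List.pyRange 0 (P.length : Int) 1)
              ∘ (fun i => PySem.List.pyGetD Pi i []) from rfl,
          ← List.map_map, PySem.List.map_pyGetD_pyRange_zero']
    rw [hidx]
    have h0 := pv_main Pi Pi 0 [] rfl
    simpa only [pvSeqOf, Nat.cast_zero] using h0
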